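-- pv_equiv track=rewrite | github.com/BUTSpeechFIT/BrnoLM | brnolm/plotting.py | _flip_ord
-- ===== SOURCE A (Python) =====
-- def _flip_ord(X, xsize, ysize):
--     assert len(X) == xsize * ysize
--     reord_X = []
--     for i in range(len(X)):
--         x_y = i // xsize
--         x_x = i % xsize
--         reord_X.append(X[x_x * ysize + x_y])
--
--     return reord_X
-- ===== SOURCE B (Python) =====
-- def _flip_ord(X, xsize, ysize):
--     assert len(X) == xsize * ysize
--     rows = [X[r * ysize:(r + 1) * ysize] for r in range(xsize)]
--     return [x for col in zip(*rows) for x in col]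
-- ===== Notes on version B (the rewrite author's own statement) =====
-- stated objective: alternative
-- what changed: B builds the transpose structurally: it slices X into xsize rows, transposes them with zip(*rows), and flattens the tuples, instead of A's per-index div/mod gather arithmetic.
-- outside the precondition, e.g. on _flip_ord([1, 2], -1, -2): A returns [1, 2], B returns []
import Mathlib
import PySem

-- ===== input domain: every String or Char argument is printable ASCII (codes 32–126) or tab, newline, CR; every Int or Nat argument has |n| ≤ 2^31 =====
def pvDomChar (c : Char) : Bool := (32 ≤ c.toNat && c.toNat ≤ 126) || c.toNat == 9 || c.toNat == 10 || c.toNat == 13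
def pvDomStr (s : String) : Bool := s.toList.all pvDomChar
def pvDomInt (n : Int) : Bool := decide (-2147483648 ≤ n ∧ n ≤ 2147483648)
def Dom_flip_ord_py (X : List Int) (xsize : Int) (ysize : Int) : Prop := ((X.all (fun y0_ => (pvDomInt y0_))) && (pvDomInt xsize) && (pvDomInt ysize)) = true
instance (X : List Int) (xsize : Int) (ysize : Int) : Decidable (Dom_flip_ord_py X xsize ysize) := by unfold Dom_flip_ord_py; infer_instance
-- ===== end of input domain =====

-- B builds the transpose structurally (slice X into xsize rows, zip(*rows), flatten)
-- instead of A's per-index div/mod gather arithmetic.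

-- ===== PORT A =====
-- gather: for i in range(len(X)): append X[(i % xsize) * ysize + i // xsize]
def flip_ord_py (X : List Int) (xsize : Int) (ysize : Int) : List Int :=
  (PySem.List.pyRange 0 (X.length : Int) 1).foldl
    (fun acc i =>
      let x_y := PySem.Int.floordiv i xsize
      let x_x := PySem.Int.mod i xsize
      acc ++ [PySem.List.pyGetD X (x_x * ysize + x_y) 0]) []

-- ===== PORT B =====
-- termination helper for pvZipStar (cited in its decreasing_by)
theorem pv_tails_len_le : ∀ (rows : List (List Int)),
    ((rows.map List.tail).map List.length).sum ≤ (rows.map List.length).sum := by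
  intro rows
  induction rows with
  | nil => simp
  | cons a t ih =>
      simp only [List.map_cons, List.sum_cons]
      have : a.tail.length ≤ a.length := by cases a <;> simp
      omega

theorem pv_tails_sum_lt (rows : List (List Int)) (hne : rows ≠ [])
    (hall : rows.all (fun r => !r.isEmpty) = true) :
    ((rows.map List.tail).map List.length).sum < (rows.map List.length).sum := by
  cases rows with
  | nil => exact absurd rfl hne
  | cons a t =>
      simp only [List.all_cons, Bool.and_eq_true] at hall
      have ha : a ≠ [] := by cases a <;> simp_all
      have : a.tail.length < a.length := by cases a with | nil => exact absurd rfl ha | cons x xs => simp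
      have := pv_tails_len_le t
      simp only [List.map_cons, List.sum_cons]
      omega

-- zip(*rows): take the heads while every row is nonempty (Python zip stops at the shortest)
def pvZipStar (rows : List (List Int)) : List (List Int) :=
  if h : rows ≠ [] ∧ rows.all (fun r => !r.isEmpty) = true then
    rows.map (fun r => r.headD 0) :: pvZipStar (rows.map List.tail)
  else []
termination_by (rows.map List.length).sum
decreasing_by simpa using pv_tails_sum_lt rows h.1 h.2

-- rows = [X[r*ysize:(r+1)*ysize] for r in range(xsize)]; return [x for col in zip(*rows) for x in col]
def flip_ord_py_alt (X : List Int) (xsize : Int) (ysize : Int) : List Int :=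
  (pvZipStar ((PySem.List.pyRange 0 xsize 1).map
    (fun r => PySem.List.slice X (some (r * ysize)) (some ((r + 1) * ysize))))).flatten

-- ===== PRECONDITION & SPEC =====
-- Pre_ requires the asserted shape len(X) = xsize*ysize (A raises AssertionError otherwise)
-- and, when X is nonempty, positive sizes: on negative sizes A returns a value only through
-- Python's negative-index wraparound while B's slices are empty there, so that degenerate
-- corner is excluded (see cites).
def Pre_flip_ord_py (X : List Int) (xsize : Int) (ysize : Int) : Prop :=
  (X.length : Int) = xsize * ysize ∧ (X = [] ∨ (0 < xsize ∧ 0 < ysize))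
instance (X : List Int) (xsize : Int) (ysize : Int) : Decidable (Pre_flip_ord_py X xsize ysize) := by
  unfold Pre_flip_ord_py; infer_instance

def pvWitness_flip_ord_py : List Int × Int × Int := ([1, 2, 3, 4, 5, 6], 2, 3)

def Spec_flip_ord_py (X : List Int) (xsize : Int) (ysize : Int) (out : List Int) : Prop := out = flip_ord_py_alt X xsize ysize
instance (X : List Int) (xsize : Int) (ysize : Int) (out : List Int) : Decidable (Spec_flip_ord_py X xsize ysize out) := by unfold Spec_flip_ord_py; infer_instance

-- ===== CLAIM (what is proved, stated in full; the proofs are below) =====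
def Claim_equal_flip_ord_py : Prop := ∀ (X : List Int) (xsize : Int) (ysize : Int), Dom_flip_ord_py X xsize ysize → Pre_flip_ord_py X xsize ysize → Spec_flip_ord_py X xsize ysize (flip_ord_py X xsize ysize)

-- ===== LEMMAS AND PROOFS =====

theorem pv_foldl_append_singleton {α β : Type} (v : α → β) :
    ∀ (l : List α) (acc : List β),
      l.foldl (fun a i => a ++ [v i]) acc = acc ++ l.map v := by
  intro l
  induction l with
  | nil => intro acc; simp
  | cons h t ih => intro acc; simp [List.foldl_cons, ih]

-- zipStar of a nonempty family of equal-length rows is the columnwise transpose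
theorem pv_zipStar_uniform : ∀ (m : Nat) (rows : List (List Int)), rows ≠ [] →
    (∀ r ∈ rows, r.length = m) →
    pvZipStar rows = (List.range m).map (fun j => rows.map (fun r => r.getD j 0)) := by
  intro m
  induction m with
  | zero =>
      intro rows hne hlen
      rw [pvZipStar.eq_def]
      have : ¬(rows ≠ [] ∧ rows.all (fun r => !r.isEmpty) = true) := by
        intro ⟨_, hall⟩
        cases rows with
        | nil => exact hne rfl
        | cons a t =>
            have := hlen a (by simp)
            have ha : a = [] := List.eq_nil_of_length_eq_zero this
            simp [ha] at hall
      rw [dif_neg this]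
      simp
  | succ m ih =>
      intro rows hne hlen
      have hallne : ∀ r ∈ rows, r ≠ [] := by
        intro r hr h
        have := hlen r hr; simp [h] at this
      have hcond : rows ≠ [] ∧ rows.all (fun r => !r.isEmpty) = true := by
        refine ⟨hne, ?_⟩
        rw [List.all_eq_true]
        intro r hr
        have := hallne r hr
        cases r with | nil => exact absurd rfl this | cons _ _ => simp
      rw [pvZipStar.eq_def, dif_pos hcond]
      have htne : rows.map List.tail ≠ [] := by
        cases rows with | nil => exact absurd rfl hne | cons _ _ => simp
      have htlen : ∀ r ∈ rows.map List.tail, r.length = m := by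
        intro r hr
        obtain ⟨s, hs, rfl⟩ := List.mem_map.mp hr
        have := hlen s hs
        cases s with | nil => simp at this | cons _ _ => simpa using this
      rw [ih (rows.map List.tail) htne htlen]
      rw [List.range_succ_eq_map, List.map_cons, List.map_map]
      congr 1
      · apply List.map_congr_left
        intro r hr
        obtain ⟨x, xs, rfl⟩ := List.exists_cons_of_ne_nil (hallne r hr)
        rfl
      · apply List.map_congr_left
        intro j _
        rw [List.map_map]
        apply List.map_congr_left
        intro r hr
        obtain ⟨x, xs, rfl⟩ := List.exists_cons_of_ne_nil (hallne r hr)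
        rfl

-- mapping over range (m*k) is the flattened double map over range m × range k
theorem pv_map_range_mul : ∀ (m : Nat) (k : Nat) (f : Nat → Int),
    (List.range (m * k)).map f
      = ((List.range m).map (fun j => (List.range k).map (fun r => f (j * k + r)))).flatten := by
  intro m
  induction m with
  | zero => intro k f; simp
  | succ m ih =>
      intro k f
      have h1 : (m + 1) * k = m * k + k := by ring
      rw [h1, List.range_add, List.map_append, ih, List.range_succ, List.map_append,
        List.flatten_append]
      simp [List.map_map, Function.comp]

theorem pv_slice_nil (a b : Int) : PySem.List.slice ([] : List Int) (some a) (some b) = [] := by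
  simp [PySem.List.slice]

-- ===== VERDICT (by name: the statement is the Claim_ definition above) =====
theorem flip_ord_py_spec : Claim_equal_flip_ord_py := by
  intro X xsize ysize _ hpre
  unfold Spec_flip_ord_py
  rcases hpre with ⟨hlen, hcase⟩
  rcases hcase with hX | ⟨hxpos, hypos⟩
  · -- X = []: A's range is empty; B's rows are all [] (or there are none), so zip is empty
    subst hX
    unfold flip_ord_py flip_ord_py_alt
    simp only [List.length_nil, Int.natCast_zero]
    rw [PySem.List.pyRange_one_eq_nil (le_refl (0 : Int))]
    simp only [List.foldl_nil]
    cases h : (PySem.List.pyRange 0 xsize 1) with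
    | nil => rw [pvZipStar.eq_def]; simp
    | cons a t =>
        rw [pvZipStar.eq_def]
        simp [pv_slice_nil]
  · -- positive sizes
    set xs := xsize.toNat with hxs_def
    set ys := ysize.toNat with hys_def
    have hxcast : xsize = (xs : Int) := by omega
    have hycast : ysize = (ys : Int) := by omega
    have hxs : 0 < xs := by omega
    have hys : 0 < ys := by omega
    set n := X.length with hn_def
    have hn : n = xs * ys := by
      have : (n : Int) = (xs : Int) * (ys : Int) := by rw [← hxcast, ← hycast]; exact hlen
      exact_mod_cast this
    -- A = map of the gather index over range n
    have hA : flip_ord_py X xsize ysize =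
        (List.range n).map (fun j => X.getD ((j % xs) * ys + j / xs) 0) := by
      unfold flip_ord_py
      rw [← hn_def, PySem.List.pyRange_zero_nat n, List.foldl_map, hxcast, hycast]
      rw [pv_foldl_append_singleton
        (fun j : Nat => PySem.List.pyGetD X ((PySem.Int.mod (j : Int) (xs : Int)) * (ys : Int)
          + PySem.Int.floordiv (j : Int) (xs : Int)) 0) (List.range n) []]
      simp only [List.nil_append]
      apply List.map_congr_left
      intro j _
      rw [PySem.Int.mod_natCast, PySem.Int.floordiv_natCast]
      rw [show ((j % xs : Nat) : Int) * (ys : Int) + ((j / xs : Nat) : Int)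
          = (((j % xs) * ys + j / xs : Nat) : Int) by push_cast; ring]
      exact PySem.List.pyGetD_natCast X _ 0
    -- B's rows are the xs chunks of X, each of length ys
    have hB : flip_ord_py_alt X xsize ysize =
        (pvZipStar ((List.range xs).map (fun r => (X.drop (r * ys)).take ys))).flatten := by
      unfold flip_ord_py_alt
      rw [hxcast, hycast, PySem.List.pyRange_zero_nat xs, List.map_map]
      have hmaps : (List.range xs).map
          ((fun r => PySem.List.slice X (some (r * (ys : Int))) (some ((r + 1) * (ys : Int))))
            ∘ (fun k : Nat => (k : Int)))
          = (List.range xs).map (fun r => (X.drop (r * ys)).take ys) := by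
        apply List.map_congr_left
        intro r _
        simp only [Function.comp]
        rw [show ((r : Int) * (ys : Int)) = ((r * ys : Nat) : Int) by push_cast; ring,
          show (((r : Int) + 1) * (ys : Int)) = (((r * ys : Nat) : Int) + ((ys : Nat) : Int)) by push_cast; ring]
        exact PySem.List.slice_natCast_add X (r * ys) ys
      rw [hmaps]
    rw [hA, hB]
    set rows := (List.range xs).map (fun r => (X.drop (r * ys)).take ys) with hrows_def
    have hrne : rows ≠ [] := by
      intro h
      rw [hrows_def, List.map_eq_nil_iff, List.range_eq_nil] at h
      omega
    have hrlen : ∀ r ∈ rows, r.length = ys := by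
      intro r hr
      rw [hrows_def] at hr
      obtain ⟨i, hi, rfl⟩ := List.mem_map.mp hr
      have hi' : i < xs := List.mem_range.mp hi
      have : i * ys + ys ≤ n := by
        calc i * ys + ys = (i + 1) * ys := by ring
          _ ≤ xs * ys := Nat.mul_le_mul_right _ (by omega)
          _ = n := hn.symm
      simp [List.length_take, List.length_drop, ← hn_def]
      omega
    rw [pv_zipStar_uniform ys rows hrne hrlen]
    -- turn columns into explicit getD values
    have hcol : (List.range ys).map (fun j => rows.map (fun r => r.getD j 0))
        = (List.range ys).map (fun j => (List.range xs).map (fun r => X.getD (r * ys + j) 0)) := by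
      apply List.map_congr_left
      intro j hj
      have hjys : j < ys := List.mem_range.mp hj
      rw [hrows_def, List.map_map]
      apply List.map_congr_left
      intro r hr
      have hrxs : r < xs := List.mem_range.mp hr
      simp only [Function.comp]
      simp only [List.getD_eq_getElem?_getD]
      rw [List.getElem?_take_of_lt hjys, List.getElem?_drop]
    rw [hcol]
    -- A's side: split range (xs*ys) into ys blocks of xs
    have hmul : xs * ys = ys * xs := Nat.mul_comm xs ys
    rw [hn, hmul, pv_map_range_mul ys xs (fun j => X.getD ((j % xs) * ys + j / xs) 0)]
    congr 1
    apply List.map_congr_left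
    intro j hj
    apply List.map_congr_left
    intro r hr
    have hrxs : r < xs := List.mem_range.mp hr
    have hmod : (j * xs + r) % xs = r := by
      rw [Nat.mul_comm j xs, Nat.mul_add_mod]
      exact Nat.mod_eq_of_lt hrxs
    have hdiv : (j * xs + r) / xs = j := by
      rw [Nat.mul_comm j xs, Nat.mul_add_div hxs, Nat.div_eq_of_lt hrxs, Nat.add_zero]
    rw [hmod, hdiv]
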